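-- pv_equiv track=rewrite | github.com/ThomasTrepanier/log6307-final-project | data/pyscent/stackoverflow/code-dump/77118_49.py | non_repetitive
-- ===== SOURCE A (Python) =====
-- def non_repetitive(list):
--
--     list1=[]
--     list2=[]
--
--     for i in list:
--         if not i in list1:
--             list1.append(i)
--
--
--     for j in list1:
--         counter=0
--         for k in list:
--             if j==k:
--                 counter+=1
--         list2.append(counter)
--
--
--     return list1, list2
-- ===== SOURCE B (Python) =====
-- def non_repetitive(list):
--     list1 = []
--     list2 = []
--     for i in list:
--         if i in list1:
--             list2[list1.index(i)] += 1
--         else: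
--             list1.append(i)
--             list2.append(1)
--     return list1, list2
-- ===== Notes on version B (the rewrite author's own statement) =====
-- stated objective: simpler
-- what changed: Replaces A's two-phase design (dedup pass, then for each distinct element a full counting scan of the input) with a single loop maintaining parallel element/count lists, incrementing the matching count in place.
import Mathlib
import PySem

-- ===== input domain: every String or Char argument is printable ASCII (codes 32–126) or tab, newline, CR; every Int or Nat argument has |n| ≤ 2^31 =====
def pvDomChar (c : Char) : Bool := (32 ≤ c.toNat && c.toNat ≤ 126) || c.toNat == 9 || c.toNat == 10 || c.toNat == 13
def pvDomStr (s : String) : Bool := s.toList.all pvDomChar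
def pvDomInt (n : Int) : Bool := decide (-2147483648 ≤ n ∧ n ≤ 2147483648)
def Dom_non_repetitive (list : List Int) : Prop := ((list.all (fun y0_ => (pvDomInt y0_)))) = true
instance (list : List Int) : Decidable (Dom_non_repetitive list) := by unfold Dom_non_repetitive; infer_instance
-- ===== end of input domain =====

-- B replaces A's two-phase design (dedup pass, then a nested counting pass per distinct
-- element) with one loop maintaining parallel element/count lists; objective: simpler.

-- ===== PORT A =====
def non_repetitive (list : List Int) : List (List Int) :=
  let list1 := list.foldl (fun l1 i => if i ∈ l1 then l1 else l1 ++ [i]) []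
  let list2 := list1.foldl
    (fun l2 j => l2 ++ [list.foldl (fun c k => if j = k then c + 1 else c) (0 : Int)]) []
  [list1, list2]

-- ===== PORT B =====
def non_repetitive_alt (list : List Int) : List (List Int) :=
  let p := list.foldl
    (fun (s : List Int × List Int) i =>
      if i ∈ s.1 then (s.1, s.2.modify (s.1.idxOf i) (· + 1))
      else (s.1 ++ [i], s.2 ++ [1]))
    ([], [])
  [p.1, p.2]

-- ===== PRECONDITION & SPEC =====
def Spec_non_repetitive (list : List Int) (out : List (List Int)) : Prop := out = non_repetitive_alt list
instance (list : List Int) (out : List (List Int)) : Decidable (Spec_non_repetitive list out) := by unfold Spec_non_repetitive; infer_instance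

-- ===== CLAIM (what is proved, stated in full; the proofs are below) =====
def Claim_equal_non_repetitive : Prop := ∀ (list : List Int), Dom_non_repetitive list → Spec_non_repetitive list (non_repetitive list)

-- ===== LEMMAS AND PROOFS =====

-- distinct elements of l in first-occurrence order (A's first loop)
def pvD (l : List Int) : List Int :=
  l.foldl (fun l1 i => if i ∈ l1 then l1 else l1 ++ [i]) []

-- A's inner counter
def pvCnt (j : Int) (l : List Int) : Int :=
  l.foldl (fun c k => if j = k then c + 1 else c) 0

theorem pvCnt_snoc (j i : Int) (l : List Int) :
    pvCnt j (l ++ [i]) = pvCnt j l + (if j = i then 1 else 0) := by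
  simp only [pvCnt, List.foldl_append, List.foldl_cons, List.foldl_nil]
  split_ifs <;> simp

theorem pvD_mem_aux (x : Int) (l acc : List Int) :
    x ∈ l.foldl (fun l1 i => if i ∈ l1 then l1 else l1 ++ [i]) acc ↔ x ∈ acc ∨ x ∈ l := by
  induction l generalizing acc with
  | nil => simp
  | cons a t ih =>
    simp only [List.foldl_cons]
    split_ifs with h
    · rw [ih]; simp only [List.mem_cons]
      constructor
      · rintro (h1 | h2)
        · exact Or.inl h1
        · exact Or.inr (Or.inr h2)
      · rintro (h1 | rfl | h2)
        · exact Or.inl h1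
        · exact Or.inl h
        · exact Or.inr h2
    · rw [ih]; simp [List.mem_append, or_assoc]
  
theorem pvD_mem (x : Int) (l : List Int) : x ∈ pvD l ↔ x ∈ l := by
  rw [pvD, pvD_mem_aux]; simp

theorem pvD_nodup_aux (l acc : List Int) (h : acc.Nodup) :
    (l.foldl (fun l1 i => if i ∈ l1 then l1 else l1 ++ [i]) acc).Nodup := by
  induction l generalizing acc with
  | nil => exact h
  | cons a t ih =>
    simp only [List.foldl_cons]
    split_ifs with hm
    · exact ih acc h
    · refine ih _ (List.nodup_append.mpr ⟨h, List.nodup_singleton _, ?_⟩)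
      intro x hx y hy
      simp only [List.mem_singleton] at hy
      subst hy
      exact fun e => hm (e ▸ hx)

theorem pvD_nodup (l : List Int) : (pvD l).Nodup := pvD_nodup_aux l [] (by simp)

theorem pvD_snoc (l : List Int) (i : Int) :
    pvD (l ++ [i]) = if i ∈ pvD l then pvD l else pvD l ++ [i] := by
  simp [pvD, List.foldl_append]

-- incrementing one occurrence vs. pointwise map, for a nodup list
theorem map_modify (l : List Int) (i : Int) (g : Int → Int)
    (hnd : l.Nodup) (hm : i ∈ l) :
    l.map (fun j => g j + (if j = i then 1 else 0)) =
      (l.map g).modify (l.idxOf i) (· + 1) := by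
  induction l with
  | nil => cases hm
  | cons a t ih =>
    rcases List.mem_cons.mp hm with rfl | h
    · have hnt : i ∉ t := (List.nodup_cons.mp hnd).1
      simp only [List.idxOf_cons_self, List.map_cons, List.modify_zero_cons]
      have ht : List.map (fun j => g j + if j = i then 1 else 0) t = List.map g t := by
        apply List.map_congr_left
        intro x hx
        have hxi : x ≠ i := fun e => hnt (e ▸ hx)
        simp [hxi]
      rw [ht]
      simp
    · have hna : a ≠ i := by
        rintro rfl; exact (List.nodup_cons.mp hnd).1 h
      rw [List.idxOf_cons_ne _ (by exact_mod_cast hna)]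
      simp only [List.map_cons, List.modify_succ_cons]
      rw [if_neg hna, add_zero, ih (List.nodup_cons.mp hnd).2 h]

theorem pvCnt_not_mem (j : Int) (l : List Int) (h : j ∉ l) : pvCnt j l = 0 := by
  induction l with
  | nil => rfl
  | cons a t ih =>
    have h' : j ≠ a ∧ j ∉ t := by simpa [not_or] using h
    simp only [pvCnt, List.foldl_cons, if_neg h'.1]
    exact ih h'.2

-- the loop invariant of B's single pass
theorem loop_inv (rest pre : List Int) :
    rest.foldl
      (fun (s : List Int × List Int) i =>
        if i ∈ s.1 then (s.1, s.2.modify (s.1.idxOf i) (· + 1))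
        else (s.1 ++ [i], s.2 ++ [1]))
      (pvD pre, (pvD pre).map (fun j => pvCnt j pre)) =
    (pvD (pre ++ rest), (pvD (pre ++ rest)).map (fun j => pvCnt j (pre ++ rest))) := by
  induction rest generalizing pre with
  | nil => simp
  | cons i t ih =>
    simp only [List.foldl_cons]
    have key :
        (if i ∈ pvD pre then
            (pvD pre, ((pvD pre).map (fun j => pvCnt j pre)).modify ((pvD pre).idxOf i) (· + 1))
          else (pvD pre ++ [i], (pvD pre).map (fun j => pvCnt j pre) ++ [1])) =
        (pvD (pre ++ [i]), (pvD (pre ++ [i])).map (fun j => pvCnt j (pre ++ [i]))) := by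
      rw [pvD_snoc]
      split_ifs with h
      · rw [← map_modify _ _ _ (pvD_nodup pre) h]
        congr 1
        apply List.map_congr_left
        intro x _
        rw [pvCnt_snoc]
      · congr 1
        rw [List.map_append]
        congr 1
        · apply List.map_congr_left
          intro x hx
          rw [pvCnt_snoc, if_neg, add_zero]
          rintro rfl; exact h hx
        · simp only [List.map_cons, List.map_nil]
          rw [pvCnt_snoc, if_pos rfl]
          have hnp : i ∉ pre := fun hp => h ((pvD_mem i pre).mpr hp)
          rw [pvCnt_not_mem i pre hnp]; norm_num
    rw [key, ih (pre ++ [i]), List.append_assoc]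
    rfl

-- A's second loop builds exactly the map of counts
theorem snd_loop (L l1 : List Int) (acc : List Int) :
    l1.foldl (fun l2 j => l2 ++ [L.foldl (fun c k => if j = k then c + 1 else c) (0 : Int)]) acc =
      acc ++ l1.map (fun j => pvCnt j L) := by
  induction l1 generalizing acc with
  | nil => simp
  | cons a t ih => simp [ih, pvCnt]

-- ===== VERDICT (by name: the statement is the Claim_ definition above) =====
theorem non_repetitive_spec : Claim_equal_non_repetitive := by
  intro list _
  show non_repetitive list = non_repetitive_alt list
  have h := loop_inv list []
  simp only [List.nil_append] at h
  have hA : non_repetitive list =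
      [pvD list, (pvD list).foldl
        (fun l2 j => l2 ++ [list.foldl (fun c k => if j = k then c + 1 else c) (0 : Int)]) []] := rfl
  have hB : non_repetitive_alt list = [pvD list, (pvD list).map (fun j => pvCnt j list)] := by
    unfold non_repetitive_alt
    rw [show (([], []) : List Int × List Int)
        = (pvD [], (pvD []).map (fun j => pvCnt j [])) from rfl, h]
  rw [hA, hB, snd_loop]
  simp
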